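-- pv_equiv track=rewrite | github.com/ashtawy/optimol | optimol/utils/utils.py | concatenate_dicts
-- ===== SOURCE A (Python) =====
-- def concatenate_dicts(dicts):
--     # Initialize an empty dictionary to hold the concatenated results
--     concatenated_dict = {}
--
--     # Iterate over each dictionary in the list
--     for d in dicts:
--         for key, value in d.items():
--             if key in concatenated_dict:
--                 # If the key is already in the result dictionary, concatenate the lists
--                 concatenated_dict[key].extend(value)
--             else:
--                 # If the key is not in the result dictionary, initialize it with the current list
--                 concatenated_dict[key] = value.copy()  # Use copy to avoid reference issues
--     return concatenated_dict
-- ===== SOURCE B (Python) =====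
-- def concatenate_dicts(dicts):
--     # Pass 1: group the value-lists by key (list-of-lists per key, first-occurrence order).
--     groups = {}
--     for d in dicts:
--         for key, value in d.items():
--             groups.setdefault(key, []).append(value)
--     # Pass 2: flatten each key's group of lists into one list.
--     return {key: [x for chunk in chunks for x in chunk] for key, chunks in groups.items()}
-- ===== Notes on version B (the rewrite author's own statement) =====
-- stated objective: alternative
-- what changed: Replaces A's single incremental extend-or-copy loop on the result dict by two differently-shaped passes: first group the value-lists per key into a list-of-lists index (setdefault/append), then flatten each key's group in a dict comprehension.
import Mathlib
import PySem

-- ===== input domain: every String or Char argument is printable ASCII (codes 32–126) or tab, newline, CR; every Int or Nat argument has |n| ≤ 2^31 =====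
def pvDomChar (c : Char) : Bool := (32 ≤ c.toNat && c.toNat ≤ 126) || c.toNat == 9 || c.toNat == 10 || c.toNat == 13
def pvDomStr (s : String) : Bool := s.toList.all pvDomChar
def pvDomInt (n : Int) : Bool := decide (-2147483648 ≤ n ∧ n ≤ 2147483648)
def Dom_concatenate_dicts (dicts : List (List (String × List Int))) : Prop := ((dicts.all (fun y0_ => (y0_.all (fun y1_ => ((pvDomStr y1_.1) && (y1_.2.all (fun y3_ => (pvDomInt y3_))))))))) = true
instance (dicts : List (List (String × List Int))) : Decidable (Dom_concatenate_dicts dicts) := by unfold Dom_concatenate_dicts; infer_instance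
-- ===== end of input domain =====

-- B rebuilds the result in two passes (group the value-lists per key, then flatten each
-- group) instead of A's incremental extend-or-copy loop; same value, not faster.


-- ===== PORT A =====
-- one iteration of A's inner loop body (extend if the key is present, else insert a copy)
def pvStepA (cd : PySem.Dict String (List Int)) (p : String × List Int) : PySem.Dict String (List Int) :=
  if cd.contains p.1 then cd.modify p.1 [] (· ++ p.2) else cd.insert p.1 p.2

def concatenate_dicts (dicts : List (List (String × List Int))) : List (String × List Int) :=
  (dicts.foldl (fun cd d => d.foldl pvStepA cd) PySem.Dict.empty).items

-- ===== PORT B =====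
def concatenate_dicts_alt (dicts : List (List (String × List Int))) : List (String × List Int) :=
  let groups := dicts.foldl
    (fun g d => d.foldl (fun g p => g.modify p.1 [] (· ++ [p.2])) g)
    (PySem.Dict.empty : PySem.Dict String (List (List Int)))
  groups.items.map (fun q => (q.1, q.2.flatMap id))

-- ===== PRECONDITION & SPEC =====
def Spec_concatenate_dicts (dicts : List (List (String × List Int))) (out : List (String × List Int)) : Prop := out = concatenate_dicts_alt dicts
instance (dicts : List (List (String × List Int))) (out : List (String × List Int)) : Decidable (Spec_concatenate_dicts dicts out) := by unfold Spec_concatenate_dicts; infer_instance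

-- ===== CLAIM (what is proved, stated in full; the proofs are below) =====
def Claim_equal_concatenate_dicts : Prop := ∀ (dicts : List (List (String × List Int))), Dom_concatenate_dicts dicts → Spec_concatenate_dicts dicts (concatenate_dicts dicts)

-- ===== LEMMAS AND PROOFS =====

-- a nested fold over a list of lists is the fold over the flattened stream
theorem pvNested {α β : Type} (l : List (List α)) (f : β → α → β) (b : β) :
    l.foldl (fun acc d => d.foldl f acc) b = (l.flatMap id).foldl f b := by
  induction l generalizing b with
  | nil => rfl
  | cons hd tl ih => simp [List.foldl_append, ih]

theorem pvA_nodup (ps : List (String × List Int)) (d : PySem.Dict String (List Int))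
    (h : d.keys.Nodup) : (ps.foldl pvStepA d).keys.Nodup := by
  induction ps generalizing d with
  | nil => exact h
  | cons p ps ih =>
    refine ih _ ?_
    unfold pvStepA
    split
    · exact (PySem.Dict.keys_modify d p.1 [] (· ++ p.2)) ▸ PySem.Dict.nodup_keys_insert _ _ _ h
    · exact PySem.Dict.nodup_keys_insert _ _ _ h

theorem pvA_keys (ps : List (String × List Int)) (d : PySem.Dict String (List Int)) :
    (ps.foldl pvStepA d).keys = PySem.Set.update d.keys (ps.map (·.1)) := by
  induction ps generalizing d with
  | nil => rfl
  | cons p ps ih =>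
    rw [List.foldl_cons, ih, List.map_cons, PySem.Set.update_cons]
    congr 1
    unfold pvStepA
    by_cases h : d.contains p.1 = true
    · rw [if_pos h, PySem.Dict.keys_modify,
        PySem.Dict.keys_insert_of_contains _ _ h,
        PySem.Set.add_of_mem ((PySem.Dict.contains_iff_mem_keys d p.1).mp h)]
    · rw [if_neg h, PySem.Dict.keys_insert_of_not_contains _ _ (by simpa using h),
        PySem.Set.add_of_not_mem]
      intro hm
      exact h ((PySem.Dict.contains_iff_mem_keys d p.1).mpr hm)

theorem pvA_getD (ps : List (String × List Int)) (d : PySem.Dict String (List Int)) (k : String)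
    (h : d.keys.Nodup) :
    (ps.foldl pvStepA d).getD k [] =
      d.getD k [] ++ ((ps.filter (fun p => p.1 == k)).map (·.2)).flatten := by
  induction ps generalizing d with
  | nil => simp
  | cons p ps ih =>
    rw [List.foldl_cons, ih _ ?hnd]
    case hnd =>
      unfold pvStepA
      split
      · exact (PySem.Dict.keys_modify d p.1 [] (· ++ p.2)) ▸ PySem.Dict.nodup_keys_insert _ _ _ h
      · exact PySem.Dict.nodup_keys_insert _ _ _ h
    have hstep : (pvStepA d p).getD k [] = d.getD k [] ++ (if k = p.1 then p.2 else []) := by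
      unfold pvStepA
      by_cases hc : d.contains p.1 = true
      · rw [if_pos hc, PySem.Dict.getD_modify]
        by_cases hk : k = p.1
        · simp [hk]
        · simp [hk]
      · rw [if_neg hc, PySem.Dict.getD_insert]
        by_cases hk : k = p.1
        · subst hk
          simp [PySem.Dict.getD_of_not_contains _ _ (by simpa using hc)]
        · simp [hk]
    rw [hstep, List.filter_cons]
    by_cases hk : k = p.1
    · subst hk
      simp [List.append_assoc]
    · have : (p.1 == k) = false := by simpa using fun h' => hk h'.symm
      simp [this, hk]

-- ===== VERDICT (by name: the statement is the Claim_ definition above) =====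
theorem concatenate_dicts_spec : Claim_equal_concatenate_dicts := by
  intro dicts _
  unfold Spec_concatenate_dicts concatenate_dicts concatenate_dicts_alt
  rw [pvNested, pvNested]
  show (List.foldl pvStepA PySem.Dict.empty (dicts.flatMap id)).items =
    List.map (fun q => (q.1, List.flatMap id q.2))
      ((List.foldl (fun g p => g.modify p.1 [] (· ++ [p.2])) PySem.Dict.empty (dicts.flatMap id)).items)
  set ps := dicts.flatMap id with hps
  -- B's groups dict: keys and per-key content
  have hndB : (ps.foldl (fun g p => g.modify p.1 [] (· ++ [p.2]))
      (PySem.Dict.empty : PySem.Dict String (List (List Int)))).keys.Nodup :=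
    PySem.Dict.nodup_keys_foldl_modify_key ps (·.1) [] (fun _ p x => x ++ [p.2]) _ (by simp)
  rw [PySem.Dict.items_eq_map_keys _ hndB []]
  -- A's result dict: keys and per-key content
  have hndA : (ps.foldl pvStepA PySem.Dict.empty).keys.Nodup := pvA_nodup _ _ (by simp)
  rw [PySem.Dict.items_eq_map_keys _ hndA [], pvA_keys,
    PySem.Dict.keys_foldl_modify_key ps (·.1) [] (fun _ p x => x ++ [p.2])]
  rw [List.map_map]
  refine List.map_congr_left ?_
  intro k _
  rw [pvA_getD _ _ _ (by simp)]
  simp only [Function.comp_apply, PySem.Dict.getD_foldl_modify_append, List.flatMap_id,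
    PySem.Dict.getD_empty, List.nil_append]
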